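-- pv_equiv track=rewrite | github.com/oa-sa/pipeline | transform.py | state_from_postcode
-- ===== SOURCE A (Python) =====
-- POSTCODE_STATE_MAP = [
--     (200, 299, "ACT"),
--     (800, 899, "NT"),
--     (900, 999, "NT"),
--     (1000, 2599, "NSW"),
--     (2600, 2619, "ACT"),
--     (2620, 2899, "NSW"),
--     (2900, 2920, "ACT"),
--     (2921, 2999, "NSW"),
--     (3000, 3999, "VIC"),
--     (4000, 4999, "QLD"),
--     (5000, 5799, "SA"),
--     (5800, 5999, "SA"),
--     (6000, 6797, "WA"),
--     (6800, 6999, "WA"),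
--     (7000, 7799, "TAS"),
--     (7800, 7999, "TAS"),
-- ]
--
-- def state_from_postcode(postcode):
--     """Derive state from Australian postcode."""
--     if not postcode:
--         return ""
--     try:
--         pc = int(postcode.strip()[:4])
--         for low, high, state in POSTCODE_STATE_MAP:
--             if low <= pc <= high:
--                 return state
--     except (ValueError, IndexError):
--         pass
--     return ""
-- ===== SOURCE B (Python) =====
-- POSTCODE_STATE_MAP = [
--     (200, 299, "ACT"),
--     (800, 899, "NT"),
--     (900, 999, "NT"),
--     (1000, 2599, "NSW"),
--     (2600, 2619, "ACT"),
--     (2620, 2899, "NSW"),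
--     (2900, 2920, "ACT"),
--     (2921, 2999, "NSW"),
--     (3000, 3999, "VIC"),
--     (4000, 4999, "QLD"),
--     (5000, 5799, "SA"),
--     (5800, 5999, "SA"),
--     (6000, 6797, "WA"),
--     (6800, 6999, "WA"),
--     (7000, 7799, "TAS"),
--     (7800, 7999, "TAS"),
-- ]
--
-- _LOWS = [low for low, _, _ in POSTCODE_STATE_MAP]
--
--
-- def _bisect_right(a, x):
--     """Index where x would be inserted to keep a sorted (rightmost)."""
--     lo, hi = 0, len(a)
--     while lo < hi:
--         mid = (lo + hi) // 2
--         if x < a[mid]: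
--             hi = mid
--         else:
--             lo = mid + 1
--     return lo
--
--
-- def state_from_postcode(postcode):
--     """Derive state from Australian postcode (binary search over the range table)."""
--     if not postcode:
--         return ""
--     try:
--         pc = int(postcode.strip()[:4])
--     except ValueError:
--         return ""
--     i = _bisect_right(_LOWS, pc)
--     if i >= 1:
--         low, high, state = POSTCODE_STATE_MAP[i - 1]
--         if low <= pc <= high:
--             return state
--     return ""
-- ===== Notes on version B (the rewrite author's own statement) =====
-- stated objective: alternative
-- what changed: The linear first-match scan of the 16-entry range table is replaced by a hand-written bisect_right binary search over the lower bounds followed by a single bounds check on the candidate row; the guard and the int(postcode.strip()[:4]) parsing are unchanged.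
import Mathlib
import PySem

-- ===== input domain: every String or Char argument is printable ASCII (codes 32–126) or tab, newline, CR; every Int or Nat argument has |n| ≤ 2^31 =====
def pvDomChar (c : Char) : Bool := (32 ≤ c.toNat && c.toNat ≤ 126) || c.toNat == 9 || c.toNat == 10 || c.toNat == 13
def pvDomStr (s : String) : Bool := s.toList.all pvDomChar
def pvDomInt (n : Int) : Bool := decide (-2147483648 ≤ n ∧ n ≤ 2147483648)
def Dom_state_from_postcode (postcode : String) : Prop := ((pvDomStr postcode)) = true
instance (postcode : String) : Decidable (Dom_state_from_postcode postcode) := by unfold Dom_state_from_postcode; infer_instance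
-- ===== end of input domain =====

-- B replaces A's linear first-match scan of the range table by a bisect_right binary search
-- over the lower bounds (alternative data-structure/traversal; same return value everywhere).


-- ===== PORT A =====
def POSTCODE_STATE_MAP : List (Int × Int × String) :=
  [(200, 299, "ACT"), (800, 899, "NT"), (900, 999, "NT"), (1000, 2599, "NSW"),
   (2600, 2619, "ACT"), (2620, 2899, "NSW"), (2900, 2920, "ACT"), (2921, 2999, "NSW"),
   (3000, 3999, "VIC"), (4000, 4999, "QLD"), (5000, 5799, "SA"), (5800, 5999, "SA"),
   (6000, 6797, "WA"), (6800, 6999, "WA"), (7000, 7799, "TAS"), (7800, 7999, "TAS")]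

-- the 'for low, high, state in …: if low <= pc <= high: return state' loop; falls through to ""
def pyScan (pc : Int) : List (Int × Int × String) → String
  | [] => ""
  | (low, high, st) :: rest => if low ≤ pc ∧ pc ≤ high then st else pyScan pc rest

def state_from_postcode (postcode : String) : String :=
  if postcode = "" then ""
  else
    -- int(postcode.strip()[:4]); ValueError → none (slicing never raises, so the caught
    -- IndexError branch of A is unreachable and the except arm is just the none case)
    match PySem.Int.ofChars? (PySem.Chars.slice (PySem.Chars.strip postcode.toList) none (some 4)) with
    | none => ""
    | some pc => pyScan pc POSTCODE_STATE_MAP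

-- ===== PORT B =====
-- _LOWS = [low for low, _, _ in POSTCODE_STATE_MAP]
def LOWS : List Int := POSTCODE_STATE_MAP.map (fun t => t.1)

-- Source B's _bisect_right is the standard bisect.bisect_right loop verbatim; it is ported as
-- PySem.List.bisectRight, the prelude's transliteration of exactly that while-loop.

-- 'if i >= 1: low, high, state = MAP[i-1]; if low <= pc <= high: return state' / 'return ""'
-- (the index i-1 is always in range since 1 ≤ i ≤ 16, so the total [_]? lookup is exact)
def rowCheck (pc : Int) (i : Nat) : String :=
  if 1 ≤ i then
    match POSTCODE_STATE_MAP[i - 1]? with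
    | some (low, high, st) => if low ≤ pc ∧ pc ≤ high then st else ""
    | none => ""
  else ""

def state_from_postcode_alt (postcode : String) : String :=
  if postcode = "" then ""
  else
    match PySem.Int.ofChars? (PySem.Chars.slice (PySem.Chars.strip postcode.toList) none (some 4)) with
    | none => ""
    | some pc => rowCheck pc (PySem.List.bisectRight LOWS pc)

-- ===== PRECONDITION & SPEC =====
def Spec_state_from_postcode (postcode : String) (out : String) : Prop := out = state_from_postcode_alt postcode
instance (postcode : String) (out : String) : Decidable (Spec_state_from_postcode postcode out) := by unfold Spec_state_from_postcode; infer_instance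

-- ===== CLAIM (what is proved, stated in full; the proofs are below) =====
def Claim_equal_state_from_postcode : Prop := ∀ (postcode : String), Dom_state_from_postcode postcode → Spec_state_from_postcode postcode (state_from_postcode postcode)

-- ===== LEMMAS AND PROOFS =====

-- A's scan over the literal table, written out as one if-chain
lemma scan_eq (pc : Int) :
    pyScan pc POSTCODE_STATE_MAP =
      (if (200:Int) ≤ pc ∧ pc ≤ 299 then "ACT" else if (800:Int) ≤ pc ∧ pc ≤ 899 then "NT" else if (900:Int) ≤ pc ∧ pc ≤ 999 then "NT" else if (1000:Int) ≤ pc ∧ pc ≤ 2599 then "NSW" else if (2600:Int) ≤ pc ∧ pc ≤ 2619 then "ACT" else if (2620:Int) ≤ pc ∧ pc ≤ 2899 then "NSW" else if (2900:Int) ≤ pc ∧ pc ≤ 2920 then "ACT" else if (2921:Int) ≤ pc ∧ pc ≤ 2999 then "NSW" else if (3000:Int) ≤ pc ∧ pc ≤ 3999 then "VIC" else if (4000:Int) ≤ pc ∧ pc ≤ 4999 then "QLD" else if (5000:Int) ≤ pc ∧ pc ≤ 5799 then "SA" else if (5800:Int) ≤ pc ∧ pc ≤ 5999 then "SA" else if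 (6000:Int) ≤ pc ∧ pc ≤ 6797 then "WA" else if (6800:Int) ≤ pc ∧ pc ≤ 6999 then "WA" else if (7000:Int) ≤ pc ∧ pc ≤ 7799 then "TAS" else if (7800:Int) ≤ pc ∧ pc ≤ 7999 then "TAS" else "") := by
  simp only [pyScan, POSTCODE_STATE_MAP]

lemma rhs0 (pc : Int) : rowCheck pc 0 = "" := rfl
lemma rhs1 (pc : Int) : rowCheck pc 1 = if (200:Int) ≤ pc ∧ pc ≤ 299 then "ACT" else "" := rfl
lemma rhs2 (pc : Int) : rowCheck pc 2 = if (800:Int) ≤ pc ∧ pc ≤ 899 then "NT" else "" := rfl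
lemma rhs3 (pc : Int) : rowCheck pc 3 = if (900:Int) ≤ pc ∧ pc ≤ 999 then "NT" else "" := rfl
lemma rhs4 (pc : Int) : rowCheck pc 4 = if (1000:Int) ≤ pc ∧ pc ≤ 2599 then "NSW" else "" := rfl
lemma rhs5 (pc : Int) : rowCheck pc 5 = if (2600:Int) ≤ pc ∧ pc ≤ 2619 then "ACT" else "" := rfl
lemma rhs6 (pc : Int) : rowCheck pc 6 = if (2620:Int) ≤ pc ∧ pc ≤ 2899 then "NSW" else "" := rfl
lemma rhs7 (pc : Int) : rowCheck pc 7 = if (2900:Int) ≤ pc ∧ pc ≤ 2920 then "ACT" else "" := rfl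
lemma rhs8 (pc : Int) : rowCheck pc 8 = if (2921:Int) ≤ pc ∧ pc ≤ 2999 then "NSW" else "" := rfl
lemma rhs9 (pc : Int) : rowCheck pc 9 = if (3000:Int) ≤ pc ∧ pc ≤ 3999 then "VIC" else "" := rfl
lemma rhs10 (pc : Int) : rowCheck pc 10 = if (4000:Int) ≤ pc ∧ pc ≤ 4999 then "QLD" else "" := rfl
lemma rhs11 (pc : Int) : rowCheck pc 11 = if (5000:Int) ≤ pc ∧ pc ≤ 5799 then "SA" else "" := rfl
lemma rhs12 (pc : Int) : rowCheck pc 12 = if (5800:Int) ≤ pc ∧ pc ≤ 5999 then "SA" else "" := rfl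
lemma rhs13 (pc : Int) : rowCheck pc 13 = if (6000:Int) ≤ pc ∧ pc ≤ 6797 then "WA" else "" := rfl
lemma rhs14 (pc : Int) : rowCheck pc 14 = if (6800:Int) ≤ pc ∧ pc ≤ 6999 then "WA" else "" := rfl
lemma rhs15 (pc : Int) : rowCheck pc 15 = if (7000:Int) ≤ pc ∧ pc ≤ 7799 then "TAS" else "" := rfl
lemma rhs16 (pc : Int) : rowCheck pc 16 = if (7800:Int) ≤ pc ∧ pc ≤ 7999 then "TAS" else "" := rfl

-- the scan and the binary-search lookup agree on every integer
lemma lookup_eq (pc : Int) :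
    pyScan pc POSTCODE_STATE_MAP = rowCheck pc (PySem.List.bisectRight LOWS pc) := by
  obtain ⟨hle, hlo, hhi⟩ := PySem.List.bisectRight_spec LOWS pc (by decide)
  have hle' : PySem.List.bisectRight LOWS pc ≤ 16 := by simpa [LOWS, POSTCODE_STATE_MAP] using hle
  have a0 : 0 < PySem.List.bisectRight LOWS pc → (200:Int) ≤ pc := fun h => by
    simpa [LOWS, POSTCODE_STATE_MAP] using hlo 0 (by decide) h
  have a1 : 1 < PySem.List.bisectRight LOWS pc → (800:Int) ≤ pc := fun h => by
    simpa [LOWS, POSTCODE_STATE_MAP] using hlo 1 (by decide) h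
  have a2 : 2 < PySem.List.bisectRight LOWS pc → (900:Int) ≤ pc := fun h => by
    simpa [LOWS, POSTCODE_STATE_MAP] using hlo 2 (by decide) h
  have a3 : 3 < PySem.List.bisectRight LOWS pc → (1000:Int) ≤ pc := fun h => by
    simpa [LOWS, POSTCODE_STATE_MAP] using hlo 3 (by decide) h
  have a4 : 4 < PySem.List.bisectRight LOWS pc → (2600:Int) ≤ pc := fun h => by
    simpa [LOWS, POSTCODE_STATE_MAP] using hlo 4 (by decide) h
  have a5 : 5 < PySem.List.bisectRight LOWS pc → (2620:Int) ≤ pc := fun h => by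
    simpa [LOWS, POSTCODE_STATE_MAP] using hlo 5 (by decide) h
  have a6 : 6 < PySem.List.bisectRight LOWS pc → (2900:Int) ≤ pc := fun h => by
    simpa [LOWS, POSTCODE_STATE_MAP] using hlo 6 (by decide) h
  have a7 : 7 < PySem.List.bisectRight LOWS pc → (2921:Int) ≤ pc := fun h => by
    simpa [LOWS, POSTCODE_STATE_MAP] using hlo 7 (by decide) h
  have a8 : 8 < PySem.List.bisectRight LOWS pc → (3000:Int) ≤ pc := fun h => by
    simpa [LOWS, POSTCODE_STATE_MAP] using hlo 8 (by decide) h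
  have a9 : 9 < PySem.List.bisectRight LOWS pc → (4000:Int) ≤ pc := fun h => by
    simpa [LOWS, POSTCODE_STATE_MAP] using hlo 9 (by decide) h
  have a10 : 10 < PySem.List.bisectRight LOWS pc → (5000:Int) ≤ pc := fun h => by
    simpa [LOWS, POSTCODE_STATE_MAP] using hlo 10 (by decide) h
  have a11 : 11 < PySem.List.bisectRight LOWS pc → (5800:Int) ≤ pc := fun h => by
    simpa [LOWS, POSTCODE_STATE_MAP] using hlo 11 (by decide) h
  have a12 : 12 < PySem.List.bisectRight LOWS pc → (6000:Int) ≤ pc := fun h => by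
    simpa [LOWS, POSTCODE_STATE_MAP] using hlo 12 (by decide) h
  have a13 : 13 < PySem.List.bisectRight LOWS pc → (6800:Int) ≤ pc := fun h => by
    simpa [LOWS, POSTCODE_STATE_MAP] using hlo 13 (by decide) h
  have a14 : 14 < PySem.List.bisectRight LOWS pc → (7000:Int) ≤ pc := fun h => by
    simpa [LOWS, POSTCODE_STATE_MAP] using hlo 14 (by decide) h
  have a15 : 15 < PySem.List.bisectRight LOWS pc → (7800:Int) ≤ pc := fun h => by
    simpa [LOWS, POSTCODE_STATE_MAP] using hlo 15 (by decide) h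
  have b0 : PySem.List.bisectRight LOWS pc ≤ 0 → pc < (200:Int) := fun h => by
    simpa [LOWS, POSTCODE_STATE_MAP] using hhi 0 (by decide) h
  have b1 : PySem.List.bisectRight LOWS pc ≤ 1 → pc < (800:Int) := fun h => by
    simpa [LOWS, POSTCODE_STATE_MAP] using hhi 1 (by decide) h
  have b2 : PySem.List.bisectRight LOWS pc ≤ 2 → pc < (900:Int) := fun h => by
    simpa [LOWS, POSTCODE_STATE_MAP] using hhi 2 (by decide) h
  have b3 : PySem.List.bisectRight LOWS pc ≤ 3 → pc < (1000:Int) := fun h => by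
    simpa [LOWS, POSTCODE_STATE_MAP] using hhi 3 (by decide) h
  have b4 : PySem.List.bisectRight LOWS pc ≤ 4 → pc < (2600:Int) := fun h => by
    simpa [LOWS, POSTCODE_STATE_MAP] using hhi 4 (by decide) h
  have b5 : PySem.List.bisectRight LOWS pc ≤ 5 → pc < (2620:Int) := fun h => by
    simpa [LOWS, POSTCODE_STATE_MAP] using hhi 5 (by decide) h
  have b6 : PySem.List.bisectRight LOWS pc ≤ 6 → pc < (2900:Int) := fun h => by
    simpa [LOWS, POSTCODE_STATE_MAP] using hhi 6 (by decide) h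
  have b7 : PySem.List.bisectRight LOWS pc ≤ 7 → pc < (2921:Int) := fun h => by
    simpa [LOWS, POSTCODE_STATE_MAP] using hhi 7 (by decide) h
  have b8 : PySem.List.bisectRight LOWS pc ≤ 8 → pc < (3000:Int) := fun h => by
    simpa [LOWS, POSTCODE_STATE_MAP] using hhi 8 (by decide) h
  have b9 : PySem.List.bisectRight LOWS pc ≤ 9 → pc < (4000:Int) := fun h => by
    simpa [LOWS, POSTCODE_STATE_MAP] using hhi 9 (by decide) h
  have b10 : PySem.List.bisectRight LOWS pc ≤ 10 → pc < (5000:Int) := fun h => by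
    simpa [LOWS, POSTCODE_STATE_MAP] using hhi 10 (by decide) h
  have b11 : PySem.List.bisectRight LOWS pc ≤ 11 → pc < (5800:Int) := fun h => by
    simpa [LOWS, POSTCODE_STATE_MAP] using hhi 11 (by decide) h
  have b12 : PySem.List.bisectRight LOWS pc ≤ 12 → pc < (6000:Int) := fun h => by
    simpa [LOWS, POSTCODE_STATE_MAP] using hhi 12 (by decide) h
  have b13 : PySem.List.bisectRight LOWS pc ≤ 13 → pc < (6800:Int) := fun h => by
    simpa [LOWS, POSTCODE_STATE_MAP] using hhi 13 (by decide) h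
  have b14 : PySem.List.bisectRight LOWS pc ≤ 14 → pc < (7000:Int) := fun h => by
    simpa [LOWS, POSTCODE_STATE_MAP] using hhi 14 (by decide) h
  have b15 : PySem.List.bisectRight LOWS pc ≤ 15 → pc < (7800:Int) := fun h => by
    simpa [LOWS, POSTCODE_STATE_MAP] using hhi 15 (by decide) h
  clear hle hlo hhi
  rw [scan_eq]
  generalize hgen : PySem.List.bisectRight LOWS pc = i at hle' a0 a1 a2 a3 a4 a5 a6 a7 a8 a9 a10 a11 a12 a13 a14 a15 b0 b1 b2 b3 b4 b5 b6 b7 b8 b9 b10 b11 b12 b13 b14 b15 ⊢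
  interval_cases i
  · rw [rhs0]
    have hu : pc < 200 := b0 (by omega)
    rw [if_neg (by omega), if_neg (by omega), if_neg (by omega), if_neg (by omega), if_neg (by omega), if_neg (by omega), if_neg (by omega), if_neg (by omega), if_neg (by omega), if_neg (by omega), if_neg (by omega), if_neg (by omega), if_neg (by omega), if_neg (by omega), if_neg (by omega), if_neg (by omega)]
  · rw [rhs1]
    have hl : (200:Int) ≤ pc := a0 (by omega)
    have hu : pc < (800:Int) := b1 (by omega)
    by_cases hC : (200:Int) ≤ pc ∧ pc ≤ 299
    · rw [if_pos hC, if_pos hC]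
    · rw [if_neg hC, if_neg hC, if_neg (by omega), if_neg (by omega), if_neg (by omega), if_neg (by omega), if_neg (by omega), if_neg (by omega), if_neg (by omega), if_neg (by omega), if_neg (by omega), if_neg (by omega), if_neg (by omega), if_neg (by omega), if_neg (by omega), if_neg (by omega), if_neg (by omega)]
  · rw [rhs2]
    have hl : (800:Int) ≤ pc := a1 (by omega)
    have hu : pc < (900:Int) := b2 (by omega)
    rw [if_neg (by omega)]
    by_cases hC : (800:Int) ≤ pc ∧ pc ≤ 899
    · rw [if_pos hC, if_pos hC]
    · rw [if_neg hC, if_neg hC, if_neg (by omega), if_neg (by omega), if_neg (by omega), if_neg (by omega), if_neg (by omega), if_neg (by omega), if_neg (by omega), if_neg (by omega), if_neg (by omega), if_neg (by omega), if_neg (by omega), if_neg (by omega), if_neg (by omega), if_neg (by omega)]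
  · rw [rhs3]
    have hl : (900:Int) ≤ pc := a2 (by omega)
    have hu : pc < (1000:Int) := b3 (by omega)
    rw [if_neg (by omega), if_neg (by omega)]
    by_cases hC : (900:Int) ≤ pc ∧ pc ≤ 999
    · rw [if_pos hC, if_pos hC]
    · rw [if_neg hC, if_neg hC, if_neg (by omega), if_neg (by omega), if_neg (by omega), if_neg (by omega), if_neg (by omega), if_neg (by omega), if_neg (by omega), if_neg (by omega), if_neg (by omega), if_neg (by omega), if_neg (by omega), if_neg (by omega), if_neg (by omega)]
  · rw [rhs4]
    have hl : (1000:Int) ≤ pc := a3 (by omega)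
    have hu : pc < (2600:Int) := b4 (by omega)
    rw [if_neg (by omega), if_neg (by omega), if_neg (by omega)]
    by_cases hC : (1000:Int) ≤ pc ∧ pc ≤ 2599
    · rw [if_pos hC, if_pos hC]
    · rw [if_neg hC, if_neg hC, if_neg (by omega), if_neg (by omega), if_neg (by omega), if_neg (by omega), if_neg (by omega), if_neg (by omega), if_neg (by omega), if_neg (by omega), if_neg (by omega), if_neg (by omega), if_neg (by omega), if_neg (by omega)]
  · rw [rhs5]
    have hl : (2600:Int) ≤ pc := a4 (by omega)
    have hu : pc < (2620:Int) := b5 (by omega)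
    rw [if_neg (by omega), if_neg (by omega), if_neg (by omega), if_neg (by omega)]
    by_cases hC : (2600:Int) ≤ pc ∧ pc ≤ 2619
    · rw [if_pos hC, if_pos hC]
    · rw [if_neg hC, if_neg hC, if_neg (by omega), if_neg (by omega), if_neg (by omega), if_neg (by omega), if_neg (by omega), if_neg (by omega), if_neg (by omega), if_neg (by omega), if_neg (by omega), if_neg (by omega), if_neg (by omega)]
  · rw [rhs6]
    have hl : (2620:Int) ≤ pc := a5 (by omega)
    have hu : pc < (2900:Int) := b6 (by omega)
    rw [if_neg (by omega), if_neg (by omega), if_neg (by omega), if_neg (by omega), if_neg (by omega)]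
    by_cases hC : (2620:Int) ≤ pc ∧ pc ≤ 2899
    · rw [if_pos hC, if_pos hC]
    · rw [if_neg hC, if_neg hC, if_neg (by omega), if_neg (by omega), if_neg (by omega), if_neg (by omega), if_neg (by omega), if_neg (by omega), if_neg (by omega), if_neg (by omega), if_neg (by omega), if_neg (by omega)]
  · rw [rhs7]
    have hl : (2900:Int) ≤ pc := a6 (by omega)
    have hu : pc < (2921:Int) := b7 (by omega)
    rw [if_neg (by omega), if_neg (by omega), if_neg (by omega), if_neg (by omega), if_neg (by omega), if_neg (by omega)]
    by_cases hC : (2900:Int) ≤ pc ∧ pc ≤ 2920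
    · rw [if_pos hC, if_pos hC]
    · rw [if_neg hC, if_neg hC, if_neg (by omega), if_neg (by omega), if_neg (by omega), if_neg (by omega), if_neg (by omega), if_neg (by omega), if_neg (by omega), if_neg (by omega), if_neg (by omega)]
  · rw [rhs8]
    have hl : (2921:Int) ≤ pc := a7 (by omega)
    have hu : pc < (3000:Int) := b8 (by omega)
    rw [if_neg (by omega), if_neg (by omega), if_neg (by omega), if_neg (by omega), if_neg (by omega), if_neg (by omega), if_neg (by omega)]
    by_cases hC : (2921:Int) ≤ pc ∧ pc ≤ 2999
    · rw [if_pos hC, if_pos hC]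
    · rw [if_neg hC, if_neg hC, if_neg (by omega), if_neg (by omega), if_neg (by omega), if_neg (by omega), if_neg (by omega), if_neg (by omega), if_neg (by omega), if_neg (by omega)]
  · rw [rhs9]
    have hl : (3000:Int) ≤ pc := a8 (by omega)
    have hu : pc < (4000:Int) := b9 (by omega)
    rw [if_neg (by omega), if_neg (by omega), if_neg (by omega), if_neg (by omega), if_neg (by omega), if_neg (by omega), if_neg (by omega), if_neg (by omega)]
    by_cases hC : (3000:Int) ≤ pc ∧ pc ≤ 3999
    · rw [if_pos hC, if_pos hC]
    · rw [if_neg hC, if_neg hC, if_neg (by omega), if_neg (by omega), if_neg (by omega), if_neg (by omega), if_neg (by omega), if_neg (by omega), if_neg (by omega)]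
  · rw [rhs10]
    have hl : (4000:Int) ≤ pc := a9 (by omega)
    have hu : pc < (5000:Int) := b10 (by omega)
    rw [if_neg (by omega), if_neg (by omega), if_neg (by omega), if_neg (by omega), if_neg (by omega), if_neg (by omega), if_neg (by omega), if_neg (by omega), if_neg (by omega)]
    by_cases hC : (4000:Int) ≤ pc ∧ pc ≤ 4999
    · rw [if_pos hC, if_pos hC]
    · rw [if_neg hC, if_neg hC, if_neg (by omega), if_neg (by omega), if_neg (by omega), if_neg (by omega), if_neg (by omega), if_neg (by omega)]
  · rw [rhs11]
    have hl : (5000:Int) ≤ pc := a10 (by omega)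
    have hu : pc < (5800:Int) := b11 (by omega)
    rw [if_neg (by omega), if_neg (by omega), if_neg (by omega), if_neg (by omega), if_neg (by omega), if_neg (by omega), if_neg (by omega), if_neg (by omega), if_neg (by omega), if_neg (by omega)]
    by_cases hC : (5000:Int) ≤ pc ∧ pc ≤ 5799
    · rw [if_pos hC, if_pos hC]
    · rw [if_neg hC, if_neg hC, if_neg (by omega), if_neg (by omega), if_neg (by omega), if_neg (by omega), if_neg (by omega)]
  · rw [rhs12]
    have hl : (5800:Int) ≤ pc := a11 (by omega)
    have hu : pc < (6000:Int) := b12 (by omega)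
    rw [if_neg (by omega), if_neg (by omega), if_neg (by omega), if_neg (by omega), if_neg (by omega), if_neg (by omega), if_neg (by omega), if_neg (by omega), if_neg (by omega), if_neg (by omega), if_neg (by omega)]
    by_cases hC : (5800:Int) ≤ pc ∧ pc ≤ 5999
    · rw [if_pos hC, if_pos hC]
    · rw [if_neg hC, if_neg hC, if_neg (by omega), if_neg (by omega), if_neg (by omega), if_neg (by omega)]
  · rw [rhs13]
    have hl : (6000:Int) ≤ pc := a12 (by omega)
    have hu : pc < (6800:Int) := b13 (by omega)
    rw [if_neg (by omega), if_neg (by omega), if_neg (by omega), if_neg (by omega), if_neg (by omega), if_neg (by omega), if_neg (by omega), if_neg (by omega), if_neg (by omega), if_neg (by omega), if_neg (by omega), if_neg (by omega)]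
    by_cases hC : (6000:Int) ≤ pc ∧ pc ≤ 6797
    · rw [if_pos hC, if_pos hC]
    · rw [if_neg hC, if_neg hC, if_neg (by omega), if_neg (by omega), if_neg (by omega)]
  · rw [rhs14]
    have hl : (6800:Int) ≤ pc := a13 (by omega)
    have hu : pc < (7000:Int) := b14 (by omega)
    rw [if_neg (by omega), if_neg (by omega), if_neg (by omega), if_neg (by omega), if_neg (by omega), if_neg (by omega), if_neg (by omega), if_neg (by omega), if_neg (by omega), if_neg (by omega), if_neg (by omega), if_neg (by omega), if_neg (by omega)]
    by_cases hC : (6800:Int) ≤ pc ∧ pc ≤ 6999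
    · rw [if_pos hC, if_pos hC]
    · rw [if_neg hC, if_neg hC, if_neg (by omega), if_neg (by omega)]
  · rw [rhs15]
    have hl : (7000:Int) ≤ pc := a14 (by omega)
    have hu : pc < (7800:Int) := b15 (by omega)
    rw [if_neg (by omega), if_neg (by omega), if_neg (by omega), if_neg (by omega), if_neg (by omega), if_neg (by omega), if_neg (by omega), if_neg (by omega), if_neg (by omega), if_neg (by omega), if_neg (by omega), if_neg (by omega), if_neg (by omega), if_neg (by omega)]
    by_cases hC : (7000:Int) ≤ pc ∧ pc ≤ 7799
    · rw [if_pos hC, if_pos hC]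
    · rw [if_neg hC, if_neg hC, if_neg (by omega)]
  · rw [rhs16]
    have hl : (7800:Int) ≤ pc := a15 (by omega)
    rw [if_neg (by omega), if_neg (by omega), if_neg (by omega), if_neg (by omega), if_neg (by omega), if_neg (by omega), if_neg (by omega), if_neg (by omega), if_neg (by omega), if_neg (by omega), if_neg (by omega), if_neg (by omega), if_neg (by omega), if_neg (by omega), if_neg (by omega)]

-- ===== VERDICT (by name: the statement is the Claim_ definition above) =====
theorem state_from_postcode_spec : Claim_equal_state_from_postcode := by
  intro postcode _
  unfold Spec_state_from_postcode state_from_postcode state_from_postcode_alt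
  split_ifs with h
  · rfl
  · cases PySem.Int.ofChars? (PySem.Chars.slice (PySem.Chars.strip postcode.toList) none (some 4)) with
    | none => rfl
    | some pc => exact lookup_eq pc
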